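-- pv_equiv track=rewrite | github.com/soleksy/Pyper | parser/cmd_module.py | url_generator
-- ===== SOURCE A (Python) =====
-- def url_generator(List_Of_Commands):
--     commands = ""
--
--     for i in range(0, len(List_Of_Commands)):
--         if (i % 2 == 0) & (i != 0):
--             commands += "+"
--
--         commands += List_Of_Commands[i]
--
--         if i % 2 == 0:
--             commands += ":"
--
--     url = "https://inspirehep.net/search?p=" + commands + \
--         "&of=recjson&ot=creator,abstract,creation_date," + \
--         "primary_report_number,number_of_citations,title," + \
--         "system_control_number,source_of_acquisition,FIXME_OAI"
--
--     return url
-- ===== SOURCE B (Python) =====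
-- def url_generator(List_Of_Commands):
--     segments = []
--     it = iter(List_Of_Commands)
--     for field in it:
--         value = next(it, "")
--         segments.append(field + ":" + value)
--     commands = "+".join(segments)
--     return ("https://inspirehep.net/search?p=" + commands +
--             "&of=recjson&ot=creator,abstract,creation_date," +
--             "primary_report_number,number_of_citations,title," +
--             "system_control_number,source_of_acquisition,FIXME_OAI")
-- ===== Notes on version B (the rewrite author's own statement) =====
-- stated objective: simpler
-- what changed: Replaces the per-index loop with parity branching by a pairwise iterator loop that renders each (field, value) pair as one 'field:value' segment and '+'.join-s the segments (the single join also avoids A's repeated string concatenation).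
import Mathlib
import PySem

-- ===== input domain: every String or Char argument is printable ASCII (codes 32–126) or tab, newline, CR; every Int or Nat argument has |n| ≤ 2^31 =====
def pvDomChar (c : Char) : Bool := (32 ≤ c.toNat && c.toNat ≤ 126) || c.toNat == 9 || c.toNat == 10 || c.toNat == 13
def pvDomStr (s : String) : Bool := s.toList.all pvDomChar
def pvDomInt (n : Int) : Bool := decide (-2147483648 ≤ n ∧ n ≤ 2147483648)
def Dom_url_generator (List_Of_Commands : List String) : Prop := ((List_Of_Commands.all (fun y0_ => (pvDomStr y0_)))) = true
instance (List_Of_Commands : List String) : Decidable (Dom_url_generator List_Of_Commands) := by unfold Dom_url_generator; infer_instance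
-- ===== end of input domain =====

-- B replaces A's per-index loop with parity branching by a pairwise recursion rendering
-- 'field:value' segments joined with '+' (objective: simpler).

-- ===== PORT A =====
-- the body of A's 'for i in range(0, len(...))' loop, named so the proofs can cite it
def pvStep (L : List String) (commands : String) (i : Int) : String :=
  let commands := if (PySem.Int.mod i 2 == 0) && (i != 0) then commands ++ "+" else commands
  let commands := commands ++ PySem.List.pyGetD L i ""
  if PySem.Int.mod i 2 == 0 then commands ++ ":" else commands

def url_generator (List_Of_Commands : List String) : String :=
  let commands :=
    (PySem.List.pyRange 0 (PySem.List.len List_Of_Commands)).foldl (pvStep List_Of_Commands) ""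
  "https://inspirehep.net/search?p=" ++ commands ++
    "&of=recjson&ot=creator,abstract,creation_date," ++
    "primary_report_number,number_of_citations,title," ++
    "system_control_number,source_of_acquisition,FIXME_OAI"

-- ===== PORT B =====
-- transliteration of Source B: 'for field in it' with 'value = next(it, "")' inside consumes the
-- iterator pairwise, so the loop is a structural recursion taking two elements per step
def pvSegLoop : List String → List String → List String
  | segments, [] => segments
  | segments, field :: rest =>
      match rest with
      | [] => segments ++ [field ++ ":" ++ ""]
      | value :: rest' => pvSegLoop (segments ++ [field ++ ":" ++ value]) rest'

def url_generator_alt (List_Of_Commands : List String) : String :=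
  let segments := pvSegLoop [] List_Of_Commands
  let commands := PySem.Str.join "+" segments
  "https://inspirehep.net/search?p=" ++ commands ++
    "&of=recjson&ot=creator,abstract,creation_date," ++
    "primary_report_number,number_of_citations,title," ++
    "system_control_number,source_of_acquisition,FIXME_OAI"

-- ===== PRECONDITION & SPEC =====
def Spec_url_generator (List_Of_Commands : List String) (out : String) : Prop := out = url_generator_alt List_Of_Commands
instance (List_Of_Commands : List String) (out : String) : Decidable (Spec_url_generator List_Of_Commands out) := by unfold Spec_url_generator; infer_instance

-- ===== CLAIM (what is proved, stated in full; the proofs are below) =====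
def Claim_equal_url_generator : Prop := ∀ (List_Of_Commands : List String), Dom_url_generator List_Of_Commands → Spec_url_generator List_Of_Commands (url_generator List_Of_Commands)

-- ===== LEMMAS AND PROOFS =====

-- proof-only helper: the segments Source B's loop produces, as a structural recursion
def pvSegments : List String → List String
  | [] => []
  | [a] => [a ++ ":" ++ ""]
  | a :: b :: rest => (a ++ ":" ++ b) :: pvSegments rest

lemma pvSegLoop_eq (rest : List String) : ∀ (segments : List String),
    pvSegLoop segments rest = segments ++ pvSegments rest := by
  induction rest using pvSegments.induct with
  | case1 => intro segments; simp [pvSegLoop, pvSegments]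
  | case2 a => intro segments; simp [pvSegLoop, pvSegments]
  | case3 a b t ih =>
    intro segments
    rw [show pvSegLoop segments (a :: b :: t)
        = pvSegLoop (segments ++ [a ++ ":" ++ b]) t from rfl]
    rw [ih]
    simp [pvSegments]

-- proof-only helper: the tail of a '+'-join, one "+" before each segment
def pvPlusCat : List String → String
  | [] => ""
  | s :: rest => "+" ++ s ++ pvPlusCat rest

lemma pvJoin_cons (s : String) (rest : List String) :
    PySem.Str.join "+" (s :: rest) = s ++ pvPlusCat rest := by
  induction rest generalizing s with
  | nil =>
    rw [← String.toList_inj]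
    simp [PySem.Str.toList_join, PySem.Chars.join_singleton, pvPlusCat]
  | cons r rest ih =>
    rw [← String.toList_inj]
    rw [PySem.Str.toList_join]
    simp only [List.map_cons, PySem.Chars.join_cons_cons]
    have hr := congrArg String.toList (ih r)
    rw [PySem.Str.toList_join] at hr
    simp only [List.map_cons] at hr
    rw [hr]
    simp [pvPlusCat]

lemma pvGetD_of_drop {L : List String} {n : Nat} {a : String} {t : List String}
    (h : L.drop n = a :: t) : PySem.List.pyGetD L (n : Int) "" = a := by
  have hlt : n < L.length := by
    by_contra hn
    rw [List.drop_eq_nil_of_le (by omega)] at h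
    simp at h
  have hg : L[n]? = some a := by rw [← List.head?_drop, h]; rfl
  rw [PySem.List.pyGetD_natCast]
  simp [List.getD, hg]

lemma pvLen_of_drop {L : List String} {n : Nat} {a : String} {t : List String}
    (h : L.drop n = a :: t) : L.length = n + 1 + t.length := by
  have := congrArg List.length h
  simp at this
  omega

lemma pvDrop_one {L : List String} {n : Nat} {a : String} {t : List String}
    (h : L.drop n = a :: t) : L.drop (n + 1) = t := by
  have h2 := congrArg (List.drop 1) h
  rw [List.drop_drop] at h2
  simpa [Nat.add_comm] using h2

lemma pvStep_even (L : List String) (c : String) (k : Nat) (a : String) (t : List String)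
    (hk : 1 ≤ k) (h : L.drop (2 * k) = a :: t) :
    pvStep L c ((2 * k : Nat) : Int) = ((c ++ "+") ++ a) ++ ":" := by
  unfold pvStep
  rw [pvGetD_of_drop h]
  simp
  intro h0
  exact absurd h0 (by omega)

lemma pvStep_odd (L : List String) (c : String) (k : Nat) (b : String) (t : List String)
    (h : L.drop (2 * k + 1) = b :: t) :
    pvStep L c ((2 * k + 1 : Nat) : Int) = c ++ b := by
  unfold pvStep
  rw [pvGetD_of_drop h]
  simp [PySem.Int.mod]

lemma pvLoop (rest : List String) : ∀ (L : List String) (k : Nat) (c : String),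
    1 ≤ k → L.drop (2 * k) = rest →
    (PySem.List.pyRange ((2 * k : Nat) : Int) (PySem.List.len L)).foldl (pvStep L) c
      = c ++ pvPlusCat (pvSegments rest) := by
  induction rest using pvSegments.induct with
  | case1 =>
    intro L k c hk h
    have hle : L.length ≤ 2 * k := by
      have := List.drop_eq_nil_iff.mp h
      omega
    rw [PySem.List.pyRange_one_eq_nil (by rw [PySem.List.len_eq]; exact_mod_cast hle)]
    rw [← String.toList_inj]
    simp [pvSegments, pvPlusCat]
  | case2 a =>
    intro L k c hk h
    have hlen : L.length = 2 * k + 1 := by have := pvLen_of_drop h; simp at this; omega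
    have hL : PySem.List.len L = ((2 * k + 1 : Nat) : Int) := by
      rw [PySem.List.len_eq, hlen]
    have hr : PySem.List.pyRange ((2 * k : Nat) : Int) (PySem.List.len L)
        = [((2 * k : Nat) : Int)] := by
      rw [PySem.List.pyRange_one_cons (by rw [hL]; push_cast; omega)]
      rw [PySem.List.pyRange_one_eq_nil (by rw [hL]; push_cast; omega)]
    rw [hr]
    simp only [List.foldl_cons, List.foldl_nil]
    rw [pvStep_even L c k a [] hk h]
    rw [← String.toList_inj]
    simp [pvSegments, pvPlusCat]
  | case3 a b t ih =>
    intro L k c hk h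
    have hb : L.drop (2 * k + 1) = b :: t := pvDrop_one h
    have ht : L.drop (2 * (k + 1)) = t := by
      have h2 := pvDrop_one hb
      rw [show 2 * (k + 1) = 2 * k + 1 + 1 from by omega]
      exact h2
    have hlen : L.length = 2 * k + 2 + t.length := by have := pvLen_of_drop h; simp at this; omega
    have hL : PySem.List.len L = ((2 * k + 2 + t.length : Nat) : Int) := by
      rw [PySem.List.len_eq, hlen]
    have hr : PySem.List.pyRange ((2 * k : Nat) : Int) (PySem.List.len L)
        = ((2 * k : Nat) : Int) :: ((2 * k + 1 : Nat) : Int)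
          :: PySem.List.pyRange ((2 * (k + 1) : Nat) : Int) (PySem.List.len L) := by
      rw [PySem.List.pyRange_one_cons (by rw [hL]; push_cast; omega)]
      rw [show ((2 * k : Nat) : Int) + 1 = ((2 * k + 1 : Nat) : Int) from by push_cast; ring]
      rw [PySem.List.pyRange_one_cons (by rw [hL]; push_cast; omega)]
      rw [show ((2 * k + 1 : Nat) : Int) + 1 = ((2 * (k + 1) : Nat) : Int) from by push_cast; ring]
    rw [hr]
    simp only [List.foldl_cons]
    rw [pvStep_even L c k a (b :: t) hk h]
    rw [pvStep_odd L _ k b t hb]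
    rw [ih L (k + 1) _ (by omega) ht]
    rw [← String.toList_inj]
    simp [pvSegments, pvPlusCat]

theorem url_generator_spec : Claim_equal_url_generator := by
  intro L _
  unfold Spec_url_generator url_generator url_generator_alt
  rw [pvSegLoop_eq]
  simp only [List.nil_append]
  match L with
  | [] =>
    rw [show pvSegments [] = [] from rfl]
    rw [show PySem.Str.join "+" ([] : List String) = "" from by decide]
    rw [PySem.List.pyRange_one_eq_nil (by rw [PySem.List.len_eq]; simp)]
    rfl
  | [a] =>
    have hr : PySem.List.pyRange 0 (PySem.List.len [a]) = [(0 : Int)] := by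
      rw [PySem.List.pyRange_one_cons (by rw [PySem.List.len_eq]; simp)]
      rw [PySem.List.pyRange_one_eq_nil (by rw [PySem.List.len_eq]; simp)]
    rw [hr]
    simp only [List.foldl_cons, List.foldl_nil]
    rw [show pvStep [a] "" 0 = ("" ++ a) ++ ":" from by
      unfold pvStep
      simp [PySem.Int.mod, PySem.List.pyGetD]]
    rw [show pvSegments [a] = [a ++ ":" ++ ""] from rfl, pvJoin_cons]
    rw [← String.toList_inj]
    simp [pvPlusCat]
  | a :: b :: t =>
    have hL : PySem.List.len (a :: b :: t) = ((2 + t.length : Nat) : Int) := by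
      rw [PySem.List.len_eq]
      push_cast
      simp
      ring
    have hr : PySem.List.pyRange 0 (PySem.List.len (a :: b :: t))
        = (0 : Int) :: (1 : Int)
          :: PySem.List.pyRange ((2 * 1 : Nat) : Int) (PySem.List.len (a :: b :: t)) := by
      rw [PySem.List.pyRange_one_cons (by rw [hL]; push_cast; omega)]
      rw [show (0 : Int) + 1 = 1 from by ring]
      rw [PySem.List.pyRange_one_cons (by rw [hL]; push_cast; omega)]
      norm_num
    rw [hr]
    simp only [List.foldl_cons]
    rw [show pvStep (a :: b :: t) "" 0 = ("" ++ a) ++ ":" from by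
      unfold pvStep
      simp [PySem.Int.mod, PySem.List.pyGetD]]
    rw [show pvStep (a :: b :: t) (("" ++ a) ++ ":") 1 = (("" ++ a) ++ ":") ++ b from by
      unfold pvStep
      simp [PySem.Int.mod, PySem.List.pyGetD]]
    rw [pvLoop t (a :: b :: t) 1 _ (by omega) (by rfl)]
    rw [show pvSegments (a :: b :: t) = (a ++ ":" ++ b) :: pvSegments t from rfl, pvJoin_cons]
    rw [← String.toList_inj]
    simp
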